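-- pv_equiv track=rewrite | github.com/wony5248/Daily_Study | daily_PS_Programmers/20210911-line/2.py | solution
-- ===== SOURCE A (Python) =====
-- def solution(research, n, k):
--     answer = ''
--     lst = []
--     dic = dict()
--     for i in range(97, 123, 1):
--         dic[chr(i)] = 0
--     for i in range(0, len(research)-n+1, 1):
--         for j in range(97, 123, 1):
--             isissue = 0
--             cnt = 0
--             for l in range(i, i+n):
--                 if research[l].count(chr(j)) >= k:
--                     cnt += research[l].count(chr(j))
--                 else:
--                     isissue = 1
--             if isissue == 0:
--                 if cnt >= 2 * n * k:
--                     lst.append(chr(j))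
--     lst.sort()
--     for i in lst:
--         dic[i] += 1
--     if max(dic.values()) == 0:
--         answer = "None"
--     else:
--         answer = max(dic, key=dic.get)
--     return answer
-- ===== SOURCE B (Python) =====
-- def solution(research, n, k):
--     # sliding windows of n consecutive strings (n >= 1)
--     L = len(research)
--     W = L - n + 1  # number of window start positions
--     target = 2 * n * k
--     best_letter, best_q = "None", 0
--     for j in range(26):
--         c = chr(97 + j)
--         # prefix sums of per-string counts of c and of the (count >= k) flag
--         P = [0]
--         Q = [0]
--         for s in research:
--             x = s.count(c)
--             P.append(P[-1] + x)
--             Q.append(Q[-1] + (1 if x >= k else 0))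
--         q = 0
--         for i in range(W):
--             if Q[i + n] - Q[i] == n and P[i + n] - P[i] >= target:
--                 q += 1
--         if q > best_q:
--             best_letter, best_q = c, q
--     return best_letter
-- ===== Notes on version B (the rewrite author's own statement) =====
-- stated objective: faster
-- what changed: B precomputes each string's count of the letter once and uses prefix sums of counts and of the (count>=k) indicator to test every window in O(1), keeping a running first-argmax instead of A's per-window per-letter rescan of the strings followed by a sort/dict/argmax tail.
-- outside the precondition, e.g. on solution(['xy', 'yz'], -2, 1): A returns 'a', B raises IndexError; on solution(['a'], -1, -1): A returns 'None', B raises IndexError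
import Mathlib
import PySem

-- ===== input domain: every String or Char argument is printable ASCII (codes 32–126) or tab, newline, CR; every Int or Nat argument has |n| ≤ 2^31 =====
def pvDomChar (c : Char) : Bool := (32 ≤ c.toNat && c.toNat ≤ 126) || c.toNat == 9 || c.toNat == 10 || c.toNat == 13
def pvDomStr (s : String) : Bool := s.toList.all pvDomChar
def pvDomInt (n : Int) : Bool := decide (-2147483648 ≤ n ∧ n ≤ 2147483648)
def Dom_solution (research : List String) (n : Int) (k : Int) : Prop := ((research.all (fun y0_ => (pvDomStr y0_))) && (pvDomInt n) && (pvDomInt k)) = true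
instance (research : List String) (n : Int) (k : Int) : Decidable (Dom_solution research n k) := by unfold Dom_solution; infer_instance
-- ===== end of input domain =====

-- B replaces A's per-window per-letter rescan of the strings by per-string letter
-- counts with prefix sums (O(1) per window) and a running first-argmax; same return value.

-- ===== PORT A =====
def solution (research : List String) (n : Int) (k : Int) : String :=
  let dic : PySem.Dict String Int :=
    (PySem.List.pyRange 97 123 1).foldl
      (fun d i => d.insert (String.ofList [Char.ofNat i.toNat]) 0) PySem.Dict.empty
  let lst : List String :=
    (PySem.List.pyRange 0 ((research.length : Int) - n + 1) 1).foldl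
      (fun lst i =>
        (PySem.List.pyRange 97 123 1).foldl
          (fun lst j =>
            -- the pair carries (isissue, cnt); research[l] is always in range here
            let p :=
              (PySem.List.pyRange i (i + n) 1).foldl
                (fun (p : Int × Int) l =>
                  if (PySem.Str.count (PySem.List.pyGetD research l "") (String.ofList [Char.ofNat j.toNat]) : Int) ≥ k then
                    (p.1, p.2 + (PySem.Str.count (PySem.List.pyGetD research l "") (String.ofList [Char.ofNat j.toNat]) : Int))
                  else (1, p.2))
                (0, 0)
            if p.1 = 0 then
              (if p.2 ≥ 2 * n * k then lst ++ [String.ofList [Char.ofNat j.toNat]] else lst)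
            else lst)
          lst)
      []
  let lst2 := PySem.List.sorted lst (fun x => x) false
  let dic2 := lst2.foldl (fun d c => d.modify c 0 (· + 1)) dic
  -- dic2 always has the 26 lowercase keys, so Python's max(...) never raises;
  -- the .getD defaults below are unreachable
  if (PySem.List.max? dic2.values (fun v => v)).getD 0 = 0 then "None"
  else (PySem.List.max? dic2.keys (fun c => dic2.getD c 0)).getD ""

-- ===== PORT B =====
def solution_alt (research : List String) (n : Int) (k : Int) : String :=
  let L : Int := research.length
  let W : Int := L - n + 1
  let target := 2 * n * k
  -- prefix-sum indices i and i+n lie in [0, L] for every window start under Pre_ (1 ≤ n),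
  -- so the pyGetD defaults are unreachable
  let best :=
    (PySem.List.pyRange 0 26 1).foldl
      (fun (st : String × Int) j =>
        let c := String.ofList [Char.ofNat (97 + j).toNat]
        let pq :=
          research.foldl
            (fun (pq : List Int × List Int) s =>
              let x : Int := PySem.Str.count s c
              (pq.1 ++ [PySem.List.pyGetD pq.1 (-1) 0 + x],
               pq.2 ++ [PySem.List.pyGetD pq.2 (-1) 0 + (if x ≥ k then 1 else 0)]))
            ([0], [0])
        let q :=
          (PySem.List.pyRange 0 W 1).foldl
            (fun (q : Int) i =>
              if PySem.List.pyGetD pq.2 (i + n) 0 - PySem.List.pyGetD pq.2 i 0 = n ∧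
                 PySem.List.pyGetD pq.1 (i + n) 0 - PySem.List.pyGetD pq.1 i 0 ≥ target
              then q + 1 else q)
            0
        if q > st.2 then (c, q) else st)
      ("None", 0)
  best.1

-- ===== PRECONDITION & SPEC =====
-- Pre_ excludes negative window sizes n < 0 — outside the sliding-window task's
-- natural domain (A degenerately reports on W = len-n+1 empty windows there, while
-- B's prefix-sum indexing then reads past the prefix arrays and raises IndexError in Python)
def Pre_solution (research : List String) (n : Int) (k : Int) : Prop := 0 ≤ n
instance (research : List String) (n : Int) (k : Int) : Decidable (Pre_solution research n k) := by unfold Pre_solution; infer_instance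
def pvWitness_solution : List String × Int × Int := (["aab", "b"], 1, 1)
def Spec_solution (research : List String) (n : Int) (k : Int) (out : String) : Prop := out = solution_alt research n k
instance (research : List String) (n : Int) (k : Int) (out : String) : Decidable (Spec_solution research n k out) := by unfold Spec_solution; infer_instance

-- ===== CLAIM (what is proved, stated in full; the proofs are below) =====
def Claim_equal_solution : Prop := ∀ (research : List String) (n : Int) (k : Int), Dom_solution research n k → Pre_solution research n k → Spec_solution research n k (solution research n k)

-- ===== LEMMAS AND PROOFS =====

-- -- proof-side vocabulary -----------------------------------------------------
def pvLetter (t : Nat) : String := String.ofList [Char.ofNat (97 + t)]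
def pvLetters : List String := (List.range 26).map pvLetter
def pvCnt (research : List String) (c : String) : List Int :=
  research.map (fun s => (PySem.Str.count s c : Int))
def pvWin (cs : List Int) (nN iN : Nat) : List Int := (cs.drop iN).take nN
def pvOk (cs : List Int) (n k : Int) (iN : Nat) : Bool :=
  (pvWin cs n.toNat iN).all (fun x => decide (k ≤ x)) &&
    decide (2 * n * k ≤ (pvWin cs n.toNat iN).sum)
def pvNum (research : List String) (n k : Int) (c : String) : Int :=
  (((List.range ((research.length : Int) - n + 1).toNat).countP
      (fun iN => pvOk (pvCnt research c) n k iN) : Nat) : Int)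
def pvFinal (ls : List String) (N : String → Int) : String :=
  if (PySem.List.max? (ls.map N) (fun v => v)).getD 0 = 0 then "None"
  else (PySem.List.max? ls N).getD ""
def pvPrefix (a : Int) : List Int → List Int
  | [] => [a]
  | x :: t => a :: pvPrefix (a + x) t
def pvInv (N : String → Int) : Option String → String × Int → Prop
  | none, st => st = ("None", 0)
  | some u, st => st.2 = N u ∧ 0 ≤ st.2 ∧ (st.2 = 0 → st.1 = "None") ∧ (st.2 ≠ 0 → st.1 = u)

-- mirrors of A's intermediate values
def pvDicA : PySem.Dict String Int :=
  (PySem.List.pyRange 97 123 1).foldl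
    (fun d i => d.insert (String.ofList [Char.ofNat i.toNat]) 0) PySem.Dict.empty
def pvLstA (research : List String) (n k : Int) : List String :=
  (PySem.List.pyRange 0 ((research.length : Int) - n + 1) 1).foldl
    (fun lst i =>
      (PySem.List.pyRange 97 123 1).foldl
        (fun lst j =>
          let p :=
            (PySem.List.pyRange i (i + n) 1).foldl
              (fun (p : Int × Int) l =>
                if (PySem.Str.count (PySem.List.pyGetD research l "") (String.ofList [Char.ofNat j.toNat]) : Int) ≥ k then
                  (p.1, p.2 + (PySem.Str.count (PySem.List.pyGetD research l "") (String.ofList [Char.ofNat j.toNat]) : Int))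
                else (1, p.2))
              (0, 0)
          if p.1 = 0 then
            (if p.2 ≥ 2 * n * k then lst ++ [String.ofList [Char.ofNat j.toNat]] else lst)
          else lst)
        lst)
    []
def pvDic2A (research : List String) (n k : Int) : PySem.Dict String Int :=
  (PySem.List.sorted (pvLstA research n k) (fun x => x) false).foldl
    (fun d c => d.modify c 0 (· + 1)) pvDicA

-- mirrors of B's intermediate values
def pvPQB (research : List String) (k : Int) (c : String) : List Int × List Int :=
  research.foldl
    (fun (pq : List Int × List Int) s =>
      (pq.1 ++ [PySem.List.pyGetD pq.1 (-1) 0 + (PySem.Str.count s c : Int)],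
       pq.2 ++ [PySem.List.pyGetD pq.2 (-1) 0 + (if (PySem.Str.count s c : Int) ≥ k then 1 else 0)]))
    ([0], [0])
def pvQB (research : List String) (n k : Int) (c : String) : Int :=
  (PySem.List.pyRange 0 ((research.length : Int) - n + 1) 1).foldl
    (fun (q : Int) i =>
      if PySem.List.pyGetD (pvPQB research k c).2 (i + n) 0 - PySem.List.pyGetD (pvPQB research k c).2 i 0 = n ∧
         PySem.List.pyGetD (pvPQB research k c).1 (i + n) 0 - PySem.List.pyGetD (pvPQB research k c).1 i 0 ≥ 2 * n * k
      then q + 1 else q)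
    0

lemma solution_eq (research : List String) (n k : Int) :
    solution research n k =
      (if (PySem.List.max? (pvDic2A research n k).values (fun v => v)).getD 0 = 0 then "None"
       else (PySem.List.max? (pvDic2A research n k).keys
              (fun c => (pvDic2A research n k).getD c 0)).getD "") := rfl

lemma solution_alt_eq (research : List String) (n k : Int) :
    solution_alt research n k =
      ((PySem.List.pyRange 0 26 1).foldl
        (fun (st : String × Int) j =>
          if pvQB research n k (String.ofList [Char.ofNat (97 + j).toNat]) > st.2
          then (String.ofList [Char.ofNat (97 + j).toNat],
                pvQB research n k (String.ofList [Char.ofNat (97 + j).toNat]))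
          else st)
        ("None", 0)).1 := by
  unfold solution_alt pvQB pvPQB
  rfl

-- -- generic fold lemmas --------------------------------------------------------
lemma pvToNat97 (t : Nat) : ((97 : Int) + (t : Nat)).toNat = 97 + t := by omega

lemma pvFoldWindow {α β : Type} (xs : List α) (d : α) (f : β → α → β) :
    ∀ (nN : Nat) (n1 i : Int) (init : β), n1.toNat = nN → 0 ≤ i → (n1 ≤ 0 ∨ i + n1 ≤ xs.length) →
    (PySem.List.pyRange i (i + n1) 1).foldl (fun acc l => f acc (PySem.List.pyGetD xs l d)) init
      = ((xs.drop i.toNat).take n1.toNat).foldl f init := by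
  intro nN
  induction nN with
  | zero =>
    intro n1 i init hn h0 _
    rw [PySem.List.pyRange_one_eq_nil (by omega), hn]
    simp
  | succ m ih =>
    intro n1 i init hn h0 h
    have hlen : i + n1 ≤ xs.length := by rcases h with h | h; omega; exact h
    have hi : i.toNat < xs.length := by omega
    rw [PySem.List.pyRange_one_cons (by omega)]
    simp only [List.foldl_cons]
    have hgd : PySem.List.pyGetD xs i d = xs[i.toNat] := by
      conv_lhs => rw [show i = ((i.toNat : Nat) : Int) by omega]
      rw [PySem.List.pyGetD_natCast]
      exact List.getD_eq_getElem xs d hi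
    rw [hgd]
    have e : i + n1 = (i + 1) + (n1 - 1) := by ring
    rw [e, ih (n1 - 1) (i + 1) _ (by omega) (by omega) (by omega)]
    rw [hn, List.drop_eq_getElem_cons hi, List.take_succ_cons,
        show (i + 1).toNat = i.toNat + 1 by omega, show (n1 - 1).toNat = m by omega]
    rfl

lemma pvInner1 (ws : List Int) (k : Int) : ∀ (b s0 : Int),
    (ws.foldl (fun (p : Int × Int) x => if x ≥ k then (p.1, p.2 + x) else (1, p.2)) (b, s0)).1
      = (if ws.all (fun x => decide (k ≤ x)) then b else 1) := by
  induction ws with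
  | nil => intro b s0; simp
  | cons x t ih =>
    intro b s0
    simp only [List.foldl_cons, List.all_cons]
    by_cases hx : x ≥ k
    · rw [if_pos hx, ih]
      simp [hx]
    · rw [if_neg hx, ih]
      have hx' : ¬ k ≤ x := hx
      by_cases ht : t.all (fun x => decide (k ≤ x)) <;> simp [hx', ht]

lemma pvInner2 (k : Int) :
    ∀ (ws : List Int), ws.all (fun x => decide (k ≤ x)) = true → ∀ (b s0 : Int),
    (ws.foldl (fun (p : Int × Int) x => if x ≥ k then (p.1, p.2 + x) else (1, p.2)) (b, s0)).2
      = s0 + ws.sum := by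
  intro ws
  induction ws with
  | nil => intro _ b s0; simp
  | cons x t ih =>
    intro hall b s0
    simp only [List.all_cons, Bool.and_eq_true, decide_eq_true_eq] at hall
    simp only [List.foldl_cons]
    rw [if_pos (show x ≥ k from hall.1)]
    rw [ih (by simpa using hall.2) _ _]
    simp [List.sum_cons]
    ring

-- A's window loop, with the strings replaced by their letter counts
lemma pvAwin (research : List String) (c : String) (n k i : Int)
    (h0 : 0 ≤ i) (h : n ≤ 0 ∨ i + n ≤ research.length) :
    (PySem.List.pyRange i (i + n) 1).foldl
      (fun (p : Int × Int) l =>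
        if (PySem.Str.count (PySem.List.pyGetD research l "") c : Int) ≥ k then
          (p.1, p.2 + (PySem.Str.count (PySem.List.pyGetD research l "") c : Int))
        else (1, p.2))
      (0, 0)
    = (pvWin (pvCnt research c) n.toNat i.toNat).foldl
        (fun (p : Int × Int) x => if x ≥ k then (p.1, p.2 + x) else (1, p.2)) (0, 0) := by
  have hgen := pvFoldWindow research ""
    (fun (p : Int × Int) s =>
      if (PySem.Str.count s c : Int) ≥ k then (p.1, p.2 + (PySem.Str.count s c : Int)) else (1, p.2))
    n.toNat n i (0, 0) rfl h0 h
  rw [hgen]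
  rw [← List.foldl_map (f := fun s => (PySem.Str.count s c : Int))
      (g := fun (p : Int × Int) x => if x ≥ k then (p.1, p.2 + x) else (1, p.2))]
  unfold pvWin pvCnt
  rw [List.map_take, List.map_drop]

-- A's letter list: one pass over the windows, the qualifying letters of each window
lemma pvLstA_eq (research : List String) (n k : Int) :
    pvLstA research n k
      = (PySem.List.pyRange 0 ((research.length : Int) - n + 1) 1).flatMap
          (fun i => pvLetters.filter (fun c => pvOk (pvCnt research c) n k i.toNat)) := by
  unfold pvLstA
  rw [PySem.List.foldl_congr_mem _ _
    (fun acc i => acc ++ pvLetters.filter (fun c => pvOk (pvCnt research c) n k i.toNat)) _ ?_]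
  · rw [PySem.List.foldl_append_eq_flatMap]
    simp
  · intro acc i hi
    rw [PySem.List.mem_pyRange_one] at hi
    show _ = acc ++ pvLetters.filter (fun c => pvOk (pvCnt research c) n k i.toNat)
    rw [PySem.List.pyRange_one 97 123, show ((123 : Int) - 97).toNat = 26 from rfl, List.foldl_map]
    rw [PySem.List.foldl_congr_mem _ _
      (fun lst t => if pvOk (pvCnt research (pvLetter t)) n k i.toNat then lst ++ [pvLetter t] else lst) _ ?_]
    · rw [PySem.List.foldl_append_if (fun t => pvOk (pvCnt research (pvLetter t)) n k i.toNat) pvLetter]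
      have hfm : pvLetters.filter (fun c => pvOk (pvCnt research c) n k i.toNat)
          = ((List.range 26).filter (fun t => pvOk (pvCnt research (pvLetter t)) n k i.toNat)).map pvLetter := by
        unfold pvLetters
        rw [List.filter_map]
        rfl
      rw [hfm]
    · intro lst t _
      show _ = if pvOk (pvCnt research (pvLetter t)) n k i.toNat = true then lst ++ [pvLetter t] else lst
      simp only [pvToNat97]
      rw [show String.ofList [Char.ofNat (97 + t)] = pvLetter t from rfl]
      rw [pvAwin research (pvLetter t) n k i hi.1 (by right; omega)]
      rw [pvInner1 _ k 0 0]
      by_cases hall : (pvWin (pvCnt research (pvLetter t)) n.toNat i.toNat).all (fun x => decide (k ≤ x))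
      · rw [if_pos hall, if_pos rfl]
        rw [pvInner2 k _ hall 0 0]
        rw [show pvOk (pvCnt research (pvLetter t)) n k i.toNat
              = decide (2 * n * k ≤ (pvWin (pvCnt research (pvLetter t)) n.toNat i.toNat).sum) by
          unfold pvOk; rw [hall]; simp]
        by_cases hs : 2 * n * k ≤ (pvWin (pvCnt research (pvLetter t)) n.toNat i.toNat).sum
        · rw [if_pos (show (0 : Int) + _ ≥ 2 * n * k by omega), if_pos (by simp [hs])]
        · rw [if_neg (show ¬ ((0 : Int) + _ ≥ 2 * n * k) by omega), if_neg (by simp [hs])]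
      · rw [if_neg hall, if_neg (show ¬ (1 : Int) = 0 by norm_num),
            if_neg (show ¬ pvOk (pvCnt research (pvLetter t)) n k i.toNat = true by
              unfold pvOk
              intro hcontra
              rw [Bool.and_eq_true] at hcontra
              exact hall hcontra.1)]

-- how often a letter is collected by A
lemma pvCount_lstA (research : List String) (n k : Int) (c : String) (hc : c ∈ pvLetters) :
    ((pvLstA research n k).count c : Int) = pvNum research n k c := by
  rw [pvLstA_eq, List.count_flatMap]
  have hnd : pvLetters.Nodup := by decide
  have h1 : ∀ i : Int, (List.count c ∘ fun i => pvLetters.filter (fun c => pvOk (pvCnt research c) n k i.toNat)) i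
      = (fun i : Int => if pvOk (pvCnt research c) n k i.toNat then (1 : Nat) else 0) i := by
    intro i
    simp only [Function.comp]
    by_cases h : pvOk (pvCnt research c) n k i.toNat
    · rw [if_pos h, List.count_filter (p := fun c' => pvOk (pvCnt research c') n k i.toNat) h,
          List.count_eq_one_of_mem hnd hc]
    · rw [if_neg h, List.count_eq_zero.2]
      intro hmem
      exact h (List.of_mem_filter (p := fun c' => pvOk (pvCnt research c') n k i.toNat) hmem)
  rw [List.map_congr_left (fun i _ => h1 i)]
  rw [PySem.List.pyRange_one 0, Int.sub_zero, List.map_map]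
  have h2 : ((fun i : Int => if pvOk (pvCnt research c) n k i.toNat then (1 : Nat) else 0) ∘ fun kk : Nat => (0 : Int) + ↑kk)
      = fun kk : Nat => if pvOk (pvCnt research c) n k kk then (1 : Nat) else 0 := by
    funext kk; simp
  rw [h2]
  unfold pvNum
  have key : ∀ (l : List Nat) (p : Nat → Bool), (l.map (fun x => if p x then (1 : Nat) else 0)).sum = l.countP p := by
    intro l p
    induction l with
    | nil => rfl
    | cons x L ih =>
      by_cases hx : p x
      · simp [hx, ih]
        omega
      · simp [hx, ih]
  exact_mod_cast key _ _

-- the initial dict: all 26 letters mapped to 0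
lemma pvDicA_eq_fold :
    pvDicA = (List.range 26).foldl (fun d t => d.insert (pvLetter t) 0) PySem.Dict.empty := by
  unfold pvDicA
  rw [PySem.List.pyRange_one 97 123, show ((123 : Int) - 97).toNat = 26 from rfl, List.foldl_map]
  simp only [pvToNat97]
  rfl

lemma pvDicA_getD (c : String) : pvDicA.getD c 0 = 0 := by
  rw [pvDicA_eq_fold]
  have aux : ∀ (l : List Nat) (d : PySem.Dict String Int), (∀ x, d.getD x 0 = 0) →
      ∀ x, (l.foldl (fun d t => d.insert (pvLetter t) 0) d).getD x 0 = 0 := by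
    intro l
    induction l with
    | nil => intro d h x; exact h x
    | cons t l ih =>
      intro d h x
      simp only [List.foldl_cons]
      refine ih _ (fun y => ?_) x
      by_cases hy : y = pvLetter t
      · subst hy; rw [PySem.Dict.getD_insert_self]
      · rw [PySem.Dict.getD_insert_of_ne _ _ _ hy]
        exact h y
  exact aux _ _ (fun x => PySem.Dict.getD_empty x 0) c

lemma pvDicA_keys : pvDicA.keys = pvLetters := by
  rw [pvDicA_eq_fold]
  rw [PySem.Dict.keys_foldl_insert_key (List.range 26) pvLetter (fun _ _ => 0) PySem.Dict.empty]
  rw [PySem.Dict.keys_empty]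
  decide

lemma pvSetUpdate_of_mem (l : List String) : ∀ (s : PySem.Set String),
    (∀ x ∈ l, x ∈ s) → PySem.Set.update s l = s := by
  induction l with
  | nil => intro s _; rfl
  | cons x t ih =>
    intro s h
    unfold PySem.Set.update at *
    simp only [List.foldl_cons]
    rw [PySem.Set.add_of_mem (h x (by simp))]
    exact ih s (fun y hy => h y (by simp [hy]))

lemma pvLstA_subset (research : List String) (n k : Int) :
    ∀ x ∈ pvLstA research n k, x ∈ pvLetters := by
  intro x hx
  rw [pvLstA_eq] at hx
  obtain ⟨i, _, hmem⟩ := List.mem_flatMap.1 hx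
  exact List.mem_of_mem_filter hmem

lemma pvDic2A_keys (research : List String) (n k : Int) :
    (pvDic2A research n k).keys = pvLetters := by
  unfold pvDic2A
  rw [PySem.Dict.keys_foldl_modify _ _ (fun _ _ => (· + 1)) _]
  rw [pvDicA_keys]
  refine pvSetUpdate_of_mem _ _ (fun x hx => ?_)
  exact pvLstA_subset research n k x ((PySem.List.mem_sorted _ _ _ _).1 hx)

lemma pvDic2A_getD (research : List String) (n k : Int) (c : String) :
    (pvDic2A research n k).getD c 0 = ((pvLstA research n k).count c : Int) := by
  unfold pvDic2A
  rw [PySem.Dict.getD_foldl_modify_add_one]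
  rw [pvDicA_getD]
  rw [(PySem.List.sorted_perm (pvLstA research n k) (fun x => x) false).count_eq c]
  ring

lemma pvValues_eq (d : PySem.Dict String Int) (h : d.keys.Nodup) :
    d.values = d.keys.map (fun c => d.getD c 0) := by
  show d.items.map (fun p => p.2) = (d.items.map (fun p => p.1)).map (fun c => d.getD c 0)
  rw [List.map_map]
  refine List.map_congr_left (fun p hp => ?_)
  exact (PySem.Dict.getD_of_mem_items d (show (p.1, p.2) ∈ d.items from hp) h 0).symm

-- -- the final argmax stage ------------------------------------------------------
def pvMaxStep {α : Type} (f : α → Int) (acc : Option α) (x : α) : Option α :=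
  match acc with
  | none => some x
  | some m => if f m < f x then some x else some m

lemma pvMax?_eq {α : Type} (ls : List α) (f : α → Int) :
    PySem.List.max? ls f = ls.foldl (pvMaxStep f) none := by
  unfold PySem.List.max?
  congr 1

lemma pvMax?_foldl_congr (ls : List String) (f g : String → Int)
    (h : ∀ x ∈ ls, f x = g x) :
    ∀ (o : Option String), (∀ a, o = some a → f a = g a) →
    ls.foldl (pvMaxStep f) o = ls.foldl (pvMaxStep g) o := by
  induction ls with
  | nil => intro o _; rfl
  | cons x t ih =>
    intro o ho
    simp only [List.foldl_cons]
    have hx : f x = g x := h x (by simp)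
    have ht : ∀ y ∈ t, f y = g y := fun y hy => h y (by simp [hy])
    cases o with
    | none =>
      simp only [pvMaxStep]
      exact ih ht (some x) (fun a ha => by cases ha; exact hx)
    | some m =>
      have hm : f m = g m := ho m rfl
      simp only [pvMaxStep]
      rw [hm, hx]
      by_cases hc : g m < g x
      · rw [if_pos hc]
        exact ih ht (some x) (fun a ha => by cases ha; exact hx)
      · rw [if_neg hc]
        exact ih ht (some m) (fun a ha => by cases ha; exact hm)

lemma pvMax?_congr (ls : List String) (f g : String → Int)
    (h : ∀ x ∈ ls, f x = g x) : PySem.List.max? ls f = PySem.List.max? ls g := by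
  rw [pvMax?_eq, pvMax?_eq]
  exact pvMax?_foldl_congr ls f g h none (by intro a ha; cases ha)

lemma pvMax?_map (ls : List String) (N : String → Int) :
    PySem.List.max? (ls.map N) (fun v => v) = (PySem.List.max? ls N).map N := by
  rw [pvMax?_eq, pvMax?_eq]
  suffices h : ∀ (o : Option String),
      (ls.map N).foldl (pvMaxStep (fun v => v)) (o.map N)
      = (ls.foldl (pvMaxStep N) o).map N by
    exact h none
  induction ls with
  | nil => intro o; rfl
  | cons c t ih =>
    intro o
    simp only [List.map_cons, List.foldl_cons]
    cases o with
    | none =>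
      simp only [pvMaxStep, Option.map_none]
      exact ih (some c)
    | some m =>
      simp only [pvMaxStep, Option.map_some]
      by_cases hc : N m < N c
      · rw [if_pos hc, if_pos hc]; exact ih (some c)
      · rw [if_neg hc, if_neg hc]; exact ih (some m)

lemma pvBridgeAux (N : String → Int) :
    ∀ (ls : List String) (o : Option String) (st : String × Int),
      (∀ c ∈ ls, 0 ≤ N c) → pvInv N o st →
      pvInv N (ls.foldl (pvMaxStep N) o)
        (ls.foldl (fun st c => if st.2 < N c then (c, N c) else st) st) := by
  intro ls
  induction ls with
  | nil => intro o st _ h; exact h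
  | cons c t ih =>
    intro o st hpos hinv
    simp only [List.foldl_cons]
    have hc : 0 ≤ N c := hpos c (by simp)
    refine ih _ _ (fun x hx => hpos x (by simp [hx])) ?_
    cases o with
    | none =>
      have hst : st = ("None", 0) := hinv
      subst hst
      simp only [pvMaxStep]
      by_cases h0 : (0 : Int) < N c
      · rw [if_pos h0]
        exact ⟨rfl, by omega, by intro h; omega, fun _ => rfl⟩
      · rw [if_neg h0]
        exact ⟨by omega, le_refl _, fun _ => rfl, by intro h; omega⟩
    | some u =>
      obtain ⟨h1, h2, h3, h4⟩ := hinv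
      simp only [pvMaxStep]
      by_cases hcmp : N u < N c
      · rw [if_pos hcmp, if_pos (by omega)]
        exact ⟨rfl, by omega, by intro h; omega, fun _ => rfl⟩
      · rw [if_neg hcmp, if_neg (by omega)]
        exact ⟨h1, h2, h3, h4⟩

lemma pvBridge (ls : List String) (N : String → Int) (hne : ls ≠ [])
    (h : ∀ c ∈ ls, 0 ≤ N c) :
    pvFinal ls N = (ls.foldl (fun st c => if st.2 < N c then (c, N c) else st) ("None", 0)).1 := by
  obtain ⟨u, hu⟩ : ∃ u, PySem.List.max? ls N = some u := by
    cases hmax : PySem.List.max? ls N with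
    | none => exact absurd ((PySem.List.max?_eq_none_iff ls N).1 hmax) hne
    | some u => exact ⟨u, rfl⟩
  have haux := pvBridgeAux N ls none ("None", 0) h rfl
  rw [← pvMax?_eq, hu] at haux
  obtain ⟨h1, _, h3, h4⟩ := haux
  unfold pvFinal
  rw [pvMax?_map, hu]
  simp only [Option.map_some, Option.getD_some]
  by_cases h0 : N u = 0
  · rw [if_pos h0]
    exact (h3 (by omega)).symm
  · rw [if_neg h0]
    exact (h4 (by omega)).symm

-- -- A reduces to pvFinal ---------------------------------------------------------
lemma pvA_eq (research : List String) (n k : Int) :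
    solution research n k = pvFinal pvLetters (pvNum research n k) := by
  rw [solution_eq]
  have hnodup : (pvDic2A research n k).keys.Nodup := by
    rw [pvDic2A_keys]; decide
  have hgd : ∀ c ∈ pvLetters, (pvDic2A research n k).getD c 0 = pvNum research n k c := by
    intro c hc
    rw [pvDic2A_getD, pvCount_lstA research n k c hc]
  rw [pvValues_eq _ hnodup, pvDic2A_keys]
  rw [List.map_congr_left hgd]
  rw [pvMax?_congr pvLetters _ _ hgd]
  rfl

-- -- B reduces to pvFinal ---------------------------------------------------------
lemma pvPQB_eq (research : List String) (k : Int) (c : String) :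
    pvPQB research k c
      = (pvPrefix 0 (pvCnt research c),
         pvPrefix 0 ((pvCnt research c).map (fun x => if x ≥ k then (1 : Int) else 0))) := by
  unfold pvPQB pvCnt
  rw [List.map_map]
  suffices h : ∀ (l : List String) (P0 Q0 : List Int) (a b : Int),
      l.foldl
        (fun (pq : List Int × List Int) s =>
          (pq.1 ++ [PySem.List.pyGetD pq.1 (-1) 0 + (PySem.Str.count s c : Int)],
           pq.2 ++ [PySem.List.pyGetD pq.2 (-1) 0 + (if (PySem.Str.count s c : Int) ≥ k then 1 else 0)]))
        (P0 ++ [a], Q0 ++ [b])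
      = (P0 ++ pvPrefix a (l.map (fun s => (PySem.Str.count s c : Int))),
         Q0 ++ pvPrefix b (l.map ((fun x => if x ≥ k then (1 : Int) else 0) ∘ fun s => (PySem.Str.count s c : Int)))) by
    simpa using h research [] [] 0 0
  intro l
  induction l with
  | nil => intro P0 Q0 a b; simp [pvPrefix]
  | cons s t ih =>
    intro P0 Q0 a b
    simp only [List.foldl_cons, PySem.List.pyGetD_neg_one_append_singleton]
    rw [show (P0 ++ [a]) ++ [a + (PySem.Str.count s c : Int)]
          = (P0 ++ [a]) ++ [a + (PySem.Str.count s c : Int)] from rfl]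
    rw [ih (P0 ++ [a]) (Q0 ++ [b])]
    simp [pvPrefix, List.append_assoc, Function.comp]

lemma pvPrefix_getD : ∀ (cs : List Int) (a : Int) (t : Nat), t ≤ cs.length →
    (pvPrefix a cs).getD t 0 = a + (cs.take t).sum := by
  intro cs
  induction cs with
  | nil =>
    intro a t ht
    have ht0 : t = 0 := by simpa using ht
    subst ht0
    simp [pvPrefix]
  | cons x l ih =>
    intro a t ht
    cases t with
    | zero => simp [pvPrefix]
    | succ m =>
      simp only [pvPrefix, List.getD_cons_succ, List.take_succ_cons, List.sum_cons]
      rw [ih (a + x) m (by simpa using ht)]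
      ring

lemma pvQB_eq (research : List String) (n k : Int) (c : String) (hn : 0 ≤ n) :
    pvQB research n k c = pvNum research n k c := by
  unfold pvQB
  have hlen : (pvCnt research c).length = research.length := by simp [pvCnt]
  have hWmem : ∀ i ∈ PySem.List.pyRange 0 ((research.length : Int) - n + 1) 1,
      (PySem.List.pyGetD (pvPQB research k c).2 (i + n) 0 - PySem.List.pyGetD (pvPQB research k c).2 i 0 = n ∧
       PySem.List.pyGetD (pvPQB research k c).1 (i + n) 0 - PySem.List.pyGetD (pvPQB research k c).1 i 0 ≥ 2 * n * k)
      ↔ (pvOk (pvCnt research c) n k i.toNat = true) := by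
    intro i hi
    rw [PySem.List.mem_pyRange_one] at hi
    obtain ⟨hi0, hiW⟩ := hi
    have hbound : i.toNat + n.toNat ≤ (pvCnt research c).length := by omega
    have hIn : i + n = ((i.toNat + n.toNat : Nat) : Int) := by omega
    have hIi : i = ((i.toNat : Nat) : Int) := by omega
    rw [pvPQB_eq research k c]
    have hys : ((pvCnt research c).map (fun x => if x ≥ k then (1 : Int) else 0)).length
        = (pvCnt research c).length := by simp
    have e1 : PySem.List.pyGetD (pvPrefix 0 ((pvCnt research c).map (fun x => if x ≥ k then (1 : Int) else 0))) (i + n) 0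
        = (((pvCnt research c).map (fun x => if x ≥ k then (1 : Int) else 0)).take (i.toNat + n.toNat)).sum := by
      rw [hIn, PySem.List.pyGetD_natCast, pvPrefix_getD _ 0 _ (by rw [hys]; omega)]
      ring
    have e2 : PySem.List.pyGetD (pvPrefix 0 ((pvCnt research c).map (fun x => if x ≥ k then (1 : Int) else 0))) i 0
        = (((pvCnt research c).map (fun x => if x ≥ k then (1 : Int) else 0)).take i.toNat).sum := by
      conv_lhs => rw [hIi]
      rw [PySem.List.pyGetD_natCast, pvPrefix_getD _ 0 _ (by rw [hys]; omega)]
      ring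
    have e3 : PySem.List.pyGetD (pvPrefix 0 (pvCnt research c)) (i + n) 0
        = ((pvCnt research c).take (i.toNat + n.toNat)).sum := by
      rw [hIn, PySem.List.pyGetD_natCast, pvPrefix_getD _ 0 _ (by omega)]
      ring
    have e4 : PySem.List.pyGetD (pvPrefix 0 (pvCnt research c)) i 0
        = ((pvCnt research c).take i.toNat).sum := by
      conv_lhs => rw [hIi]
      rw [PySem.List.pyGetD_natCast, pvPrefix_getD _ 0 _ (by omega)]
      ring
    rw [e1, e2, e3, e4]
    rw [List.take_add, List.take_add, List.sum_append, List.sum_append]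
    have hwinmap : ((((pvCnt research c).map (fun x => if x ≥ k then (1 : Int) else 0)).drop i.toNat).take n.toNat)
        = (((pvCnt research c).drop i.toNat).take n.toNat).map (fun x => if x ≥ k then (1 : Int) else 0) := by
      rw [List.map_take, List.map_drop]
    rw [hwinmap]
    have hsum : ((((pvCnt research c).drop i.toNat).take n.toNat).map (fun x => if x ≥ k then (1 : Int) else 0)).sum
        = ((((pvCnt research c).drop i.toNat).take n.toNat).countP (fun x => decide (k ≤ x)) : Int) := by
      rw [show (fun x : Int => if x ≥ k then (1 : Int) else 0)
            = (fun x : Int => if (decide (k ≤ x)) = true then (1 : Int) else 0) by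
        funext x; by_cases h : k ≤ x <;> simp [h]]
      exact PySem.List.sum_map_ite_one_zero _ _
    have hwl : (((pvCnt research c).drop i.toNat).take n.toNat).length = n.toNat := by
      rw [List.length_take, List.length_drop]; omega
    have hcle : (((pvCnt research c).drop i.toNat).take n.toNat).countP (fun x => decide (k ≤ x))
        ≤ n.toNat := by
      have h0 := List.countP_le_length (p := fun x => decide (k ≤ x))
        (l := ((pvCnt research c).drop i.toNat).take n.toNat)
      rw [hwl] at h0
      exact h0
    unfold pvOk pvWin
    rw [Bool.and_eq_true, decide_eq_true_eq]
    constructor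
    · rintro ⟨h1, h2⟩
      rw [hsum] at h1
      have hcount : (((pvCnt research c).drop i.toNat).take n.toNat).countP (fun x => decide (k ≤ x)) = n.toNat := by
        omega
      have hallm : ∀ a ∈ ((pvCnt research c).drop i.toNat).take n.toNat, (fun x => decide (k ≤ x)) a = true :=
        List.countP_eq_length.1 (by rw [hcount, hwl])
      exact ⟨List.all_eq_true.2 hallm, by omega⟩
    · rintro ⟨hall, hsum2⟩
      have hcnt : (((pvCnt research c).drop i.toNat).take n.toNat).countP (fun x => decide (k ≤ x))
          = (((pvCnt research c).drop i.toNat).take n.toNat).length :=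
        List.countP_eq_length.2 (List.all_eq_true.1 hall)
      constructor
      · rw [hsum, hcnt, hwl]; omega
      · omega
  rw [PySem.List.foldl_congr_mem _ _
    (fun (q : Int) i => if pvOk (pvCnt research c) n k i.toNat then q + 1 else q) 0 ?_]
  · rw [PySem.List.foldl_if_add_one (fun i : Int => pvOk (pvCnt research c) n k i.toNat) _ 0]
    rw [PySem.List.pyRange_one 0, Int.sub_zero, List.countP_map, zero_add]
    unfold pvNum
    norm_cast
    refine List.countP_congr (fun t _ => ?_)
    simp [Function.comp]
  · intro q i hi
    show _ = if pvOk (pvCnt research c) n k i.toNat = true then q + 1 else q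
    by_cases h : (PySem.List.pyGetD (pvPQB research k c).2 (i + n) 0 - PySem.List.pyGetD (pvPQB research k c).2 i 0 = n ∧
       PySem.List.pyGetD (pvPQB research k c).1 (i + n) 0 - PySem.List.pyGetD (pvPQB research k c).1 i 0 ≥ 2 * n * k)
    · rw [if_pos h, if_pos ((hWmem i hi).1 h)]
    · rw [if_neg h, if_neg (fun hh => h ((hWmem i hi).2 hh))]

lemma pvNum_nonneg (research : List String) (n k : Int) (c : String) :
    0 ≤ pvNum research n k c := by
  unfold pvNum
  positivity

lemma pvB_eq (research : List String) (n k : Int) (hn : 0 ≤ n) :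
    solution_alt research n k = pvFinal pvLetters (pvNum research n k) := by
  rw [solution_alt_eq research n k]
  rw [PySem.List.foldl_congr_mem _ _
    (fun (st : String × Int) j =>
      if st.2 < pvNum research n k (String.ofList [Char.ofNat (97 + j).toNat])
      then (String.ofList [Char.ofNat (97 + j).toNat],
            pvNum research n k (String.ofList [Char.ofNat (97 + j).toNat]))
      else st) ("None", 0) ?_]
  · rw [PySem.List.pyRange_one 0, Int.sub_zero, List.foldl_map]
    rw [pvBridge pvLetters (pvNum research n k) (by decide)
      (fun c _ => pvNum_nonneg research n k c)]
    unfold pvLetters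
    rw [List.foldl_map]
    refine congrArg _ (PySem.List.foldl_congr_mem _ _ _ _ ?_)
    intro st t _
    show (if st.2 < pvNum research n k (String.ofList [Char.ofNat (97 + ((0 : Int) + (t : Nat))).toNat])
          then (String.ofList [Char.ofNat (97 + ((0 : Int) + (t : Nat))).toNat],
                pvNum research n k (String.ofList [Char.ofNat (97 + ((0 : Int) + (t : Nat))).toNat]))
          else st)
        = if st.2 < pvNum research n k (pvLetter t) then (pvLetter t, pvNum research n k (pvLetter t)) else st
    rw [show String.ofList [Char.ofNat (97 + ((0 : Int) + (t : Nat))).toNat] = pvLetter t by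
      unfold pvLetter
      rw [show (97 + ((0 : Int) + (t : Nat))).toNat = 97 + t by omega]]
  · intro st j _
    show (if pvQB research n k (String.ofList [Char.ofNat (97 + j).toNat]) > st.2
          then (String.ofList [Char.ofNat (97 + j).toNat],
                pvQB research n k (String.ofList [Char.ofNat (97 + j).toNat]))
          else st)
        = if st.2 < pvNum research n k (String.ofList [Char.ofNat (97 + j).toNat])
          then (String.ofList [Char.ofNat (97 + j).toNat],
                pvNum research n k (String.ofList [Char.ofNat (97 + j).toNat]))
          else st
    rw [pvQB_eq research n k _ (by omega)]

-- ===== VERDICT (by name: the statement is the Claim_ definition above) =====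
theorem solution_spec : Claim_equal_solution := by
  intro research n k _ hpre
  show solution research n k = solution_alt research n k
  rw [pvA_eq, pvB_eq research n k hpre]
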